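-- pv_equiv track=rewrite | github.com/makeling/arcgis_automate_checking_tools | base_enterprise_pressure_testing_tool.py | classify_items
-- ===== SOURCE A (Python) =====
-- def classify_items(item_list):
--     fs_list = []
--     ss_list = []
--     ms_list = []
--     wmts_list = []
--     for item in item_list:
--         type = item['type']
--         if type == 'Feature Service':
--             fs_list.append(item)
--         elif type == 'Scene Service':
--             ss_list.append(item)
--         elif type == 'Map Service':
--             ms_list.append(item)
--         elif type == 'WMTS':
--             wmts_list.append(item)
--     return fs_list, ss_list,ms_list, wmts_list
-- ===== SOURCE B (Python) =====
-- def classify_items(item_list):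
--     types = [item['type'] for item in item_list]
--
--     def pick(wanted):
--         return [item for item, t in zip(item_list, types) if t == wanted]
--
--     return (pick('Feature Service'), pick('Scene Service'),
--             pick('Map Service'), pick('WMTS'))
-- ===== Notes on version B (the rewrite author's own statement) =====
-- stated objective: alternative
-- what changed: Replaces the single pass with four list accumulators and an if/elif chain by staged passes: extract the type of every item once (still raising KeyError on a missing key), then build each of the four buckets with its own independent filter pass.
import Mathlib
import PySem

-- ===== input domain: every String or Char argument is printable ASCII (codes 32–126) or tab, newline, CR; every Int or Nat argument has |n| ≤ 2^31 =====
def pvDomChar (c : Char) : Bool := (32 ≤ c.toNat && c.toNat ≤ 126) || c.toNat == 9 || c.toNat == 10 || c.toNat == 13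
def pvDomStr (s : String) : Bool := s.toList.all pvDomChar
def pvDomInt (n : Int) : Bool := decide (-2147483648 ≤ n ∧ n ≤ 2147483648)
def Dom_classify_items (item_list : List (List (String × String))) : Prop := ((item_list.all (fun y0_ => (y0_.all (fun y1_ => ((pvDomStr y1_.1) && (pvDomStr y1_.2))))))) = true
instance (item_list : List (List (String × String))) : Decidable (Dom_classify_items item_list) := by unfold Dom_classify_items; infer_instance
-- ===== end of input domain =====

-- B replaces A's single pass with four accumulators by staged passes: extract every
-- item's type once, then build each bucket with its own filter pass; same return value.


-- ===== PORT A =====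
-- for-loop over item_list with four list accumulators and an if/elif chain; item['type'] is
-- first-match lookup (PySem.Dict.get?), none = KeyError (excluded by Pre_)
def classify_items (item_list : List (List (String × String))) : (List (List (String × String))) × (List (List (String × String))) × (List (List (String × String))) × (List (List (String × String))) :=
  item_list.foldl (fun s item =>
    match (PySem.Dict.mk item).get? "type" with
    | none => s   -- KeyError in Python; unreachable under Pre_
    | some t =>
      if t = "Feature Service" then (s.1 ++ [item], s.2.1, s.2.2.1, s.2.2.2)
      else if t = "Scene Service" then (s.1, s.2.1 ++ [item], s.2.2.1, s.2.2.2)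
      else if t = "Map Service" then (s.1, s.2.1, s.2.2.1 ++ [item], s.2.2.2)
      else if t = "WMTS" then (s.1, s.2.1, s.2.2.1, s.2.2.2 ++ [item])
      else s) ([], [], [], [])

-- ===== PORT B =====
-- staged passes: types extracted once (none = KeyError, excluded by Pre_), then one
-- independent filter pass per bucket over the (item, type) pairs
def pvPick (item_list : List (List (String × String))) (types : List (Option String)) (wanted : String) : List (List (String × String)) :=
  ((item_list.zip types).filter (fun p => p.2 == some wanted)).map (·.1)

def classify_items_alt (item_list : List (List (String × String))) : (List (List (String × String))) × (List (List (String × String))) × (List (List (String × String))) × (List (List (String × String))) :=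
  let types := item_list.map (fun item => (PySem.Dict.mk item).get? "type")
  (pvPick item_list types "Feature Service", pvPick item_list types "Scene Service",
   pvPick item_list types "Map Service", pvPick item_list types "WMTS")

-- ===== PRECONDITION & SPEC =====
-- Pre_ excludes exactly the inputs where some item lacks a 'type' key, on which Python A raises KeyError.
def Pre_classify_items (item_list : List (List (String × String))) : Prop :=
  ∀ item ∈ item_list, item.any (fun p => p.1 == "type") = true
instance (item_list : List (List (String × String))) : Decidable (Pre_classify_items item_list) := by unfold Pre_classify_items; infer_instance
def pvWitness_classify_items : (List (List (String × String))) :=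
  [[("type", "Feature Service"), ("title", "a")], [("type", "WMTS")], [("type", "other")]]
def Spec_classify_items (item_list : List (List (String × String))) (out : (List (List (String × String))) × (List (List (String × String))) × (List (List (String × String))) × (List (List (String × String)))) : Prop := out = classify_items_alt item_list
instance (item_list : List (List (String × String))) (out : (List (List (String × String))) × (List (List (String × String))) × (List (List (String × String))) × (List (List (String × String)))) : Decidable (Spec_classify_items item_list out) := by unfold Spec_classify_items; infer_instance

-- ===== CLAIM (what is proved, stated in full; the proofs are below) =====
def Claim_equal_classify_items : Prop := ∀ (item_list : List (List (String × String))), Dom_classify_items item_list → Pre_classify_items item_list → Spec_classify_items item_list (classify_items item_list)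

-- ===== LEMMAS AND PROOFS =====

lemma pv_loop (l : List (List (String × String)))
    (s : (List (List (String × String))) × (List (List (String × String))) × (List (List (String × String))) × (List (List (String × String)))) :
    l.foldl (fun s item =>
      match (PySem.Dict.mk item).get? "type" with
      | none => s
      | some t =>
        if t = "Feature Service" then (s.1 ++ [item], s.2.1, s.2.2.1, s.2.2.2)
        else if t = "Scene Service" then (s.1, s.2.1 ++ [item], s.2.2.1, s.2.2.2)
        else if t = "Map Service" then (s.1, s.2.1, s.2.2.1 ++ [item], s.2.2.2)
        else if t = "WMTS" then (s.1, s.2.1, s.2.2.1, s.2.2.2 ++ [item])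
        else s) s
    = (let types := l.map (fun item => (PySem.Dict.mk item).get? "type")
       (s.1 ++ pvPick l types "Feature Service", s.2.1 ++ pvPick l types "Scene Service",
        s.2.2.1 ++ pvPick l types "Map Service", s.2.2.2 ++ pvPick l types "WMTS")) := by
  induction l generalizing s with
  | nil => simp [pvPick]
  | cons item rest ih =>
    simp only [List.foldl_cons, List.map_cons]
    rw [ih]
    cases hget : (PySem.Dict.mk item).get? "type" with
    | none => simp [pvPick]
    | some t =>
      by_cases h1 : t = "Feature Service"
      · simp [pvPick, h1]
      · by_cases h2 : t = "Scene Service"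
        · simp [pvPick, h2]
        · by_cases h3 : t = "Map Service"
          · simp [pvPick, h3]
          · by_cases h4 : t = "WMTS"
            · simp [pvPick, h4]
            · simp [pvPick, h1, h2, h3, h4]

-- ===== VERDICT (by name: the statement is the Claim_ definition above) =====
theorem classify_items_spec : Claim_equal_classify_items := by
  intro item_list _ _
  unfold Spec_classify_items classify_items classify_items_alt
  simp [pv_loop]
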